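-- pv_equiv track=rewrite | github.com/ribbitx/ribbitxdb | advanced/window_functions.py | _ntile
-- ===== SOURCE A (Python) =====
-- from typing import List, Dict, Any, Callable
--
-- def _ntile(partition: List[Dict[str, Any]], args: List[Any]) -> List[int]:
--     n = args[0] if args else 4
--     partition_size = len(partition)
--     bucket_size = partition_size // n
--     remainder = partition_size % n
--
--     results = []
--     current_bucket = 1
--     count_in_bucket = 0
--     bucket_limit = bucket_size + (1 if current_bucket <= remainder else 0)
--
--     for _ in partition:
--         results.append(current_bucket)
--         count_in_bucket += 1
--
--         if count_in_bucket >= bucket_limit and current_bucket < n: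
--             current_bucket += 1
--             count_in_bucket = 0
--             bucket_limit = bucket_size + (1 if current_bucket <= remainder else 0)
--
--     return results
-- ===== SOURCE B (Python) =====
-- from typing import List, Dict, Any
--
-- def _ntile(partition: List[Dict[str, Any]], args: List[Any]) -> List[int]:
--     n = args[0] if args else 4
--     size = len(partition)
--     bucket_size, remainder = divmod(size, n)
--     threshold = remainder * (bucket_size + 1)
--     return [i // (bucket_size + 1) + 1 if i < threshold
--             else remainder + (i - threshold) // bucket_size + 1
--             for i in range(size)]
-- ===== Notes on version B (the rewrite author's own statement) =====
-- stated objective: simpler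
-- what changed: Replaced A's running-counter state machine (current_bucket/count_in_bucket/bucket_limit updated per row) by a stateless closed-form arithmetic formula mapping each row index directly to its bucket.
-- outside the precondition, e.g. on _ntile([{'a': 1}], [-2]): A returns [1], B returns [0]
import Mathlib
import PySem

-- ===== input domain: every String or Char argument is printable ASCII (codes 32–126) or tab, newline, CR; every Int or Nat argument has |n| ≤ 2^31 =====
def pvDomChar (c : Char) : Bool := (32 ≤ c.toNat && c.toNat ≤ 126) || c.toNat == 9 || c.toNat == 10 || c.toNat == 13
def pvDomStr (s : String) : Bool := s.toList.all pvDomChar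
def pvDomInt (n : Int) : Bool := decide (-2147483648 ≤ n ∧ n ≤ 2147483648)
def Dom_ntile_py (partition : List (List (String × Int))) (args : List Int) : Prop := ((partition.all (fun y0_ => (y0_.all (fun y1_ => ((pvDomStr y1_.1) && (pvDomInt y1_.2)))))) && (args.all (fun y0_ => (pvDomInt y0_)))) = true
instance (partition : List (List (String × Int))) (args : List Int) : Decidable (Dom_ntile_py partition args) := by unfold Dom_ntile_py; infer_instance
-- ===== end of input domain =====

-- B replaces A's running-counter state machine by a closed-form per-index bucket formula (objective: simpler).

-- ===== PORT A =====
-- loop body of A's for-loop, as a fold step over the state (results, current_bucket, count_in_bucket, bucket_limit)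
def ntileStep (n bucket_size remainder : Int) (st : List Int × Int × Int × Int)
    (_row : List (String × Int)) : List Int × Int × Int × Int :=
  let results := st.1 ++ [st.2.1]
  let count_in_bucket := st.2.2.1 + 1
  if st.2.2.2 ≤ count_in_bucket ∧ st.2.1 < n then
    (results, st.2.1 + 1, 0, bucket_size + (if st.2.1 + 1 ≤ remainder then 1 else 0))
  else
    (results, st.2.1, count_in_bucket, st.2.2.2)

def ntile_py (partition : List (List (String × Int))) (args : List Int) : List Int :=
  let n : Int := match args with | a :: _ => a | [] => 4
  let partition_size : Int := PySem.List.len partition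
  let bucket_size : Int := PySem.Int.floordiv partition_size n
  let remainder : Int := PySem.Int.mod partition_size n
  (partition.foldl (ntileStep n bucket_size remainder)
    ([], 1, 0, bucket_size + (if (1 : Int) ≤ remainder then 1 else 0))).1

-- ===== PORT B =====
-- B's per-index bucket: i // (bucket_size+1) + 1 below the threshold, else remainder + (i-threshold) // bucket_size + 1
def ntileBucket (bucket_size remainder threshold i : Int) : Int :=
  if i < threshold then PySem.Int.floordiv i (bucket_size + 1) + 1
  else remainder + PySem.Int.floordiv (i - threshold) bucket_size + 1

def ntile_py_alt (partition : List (List (String × Int))) (args : List Int) : List Int :=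
  let n : Int := match args with | a :: _ => a | [] => 4
  let size : Int := PySem.List.len partition
  let bucket_size : Int := PySem.Int.floordiv size n
  let remainder : Int := PySem.Int.mod size n
  let threshold : Int := remainder * (bucket_size + 1)
  (PySem.List.pyRange 0 size 1).map (ntileBucket bucket_size remainder threshold)

-- ===== PRECONDITION & SPEC =====
-- Pre_ restricts to the natural NTILE domain n ≥ 1 (empty args means n = 4): n = 0 makes A raise
-- ZeroDivisionError, and a negative bucket count is outside any NTILE contract — there A's all-ones
-- output and B's arithmetic output are both accidental and nobody would specify either.
def Pre_ntile_py (partition : List (List (String × Int))) (args : List Int) : Prop :=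
  args = [] ∨ 1 ≤ args.headI
instance (partition : List (List (String × Int))) (args : List Int) : Decidable (Pre_ntile_py partition args) := by unfold Pre_ntile_py; infer_instance
def pvWitness_ntile_py : (List (List (String × Int))) × List Int := ([[("a", 1)], [("b", 2)], []], [2])
def Spec_ntile_py (partition : List (List (String × Int))) (args : List Int) (out : List Int) : Prop := out = ntile_py_alt partition args
instance (partition : List (List (String × Int))) (args : List Int) (out : List Int) : Decidable (Spec_ntile_py partition args out) := by unfold Spec_ntile_py; infer_instance

-- ===== CLAIM (what is proved, stated in full; the proofs are below) =====
def Claim_equal_ntile_py : Prop := ∀ (partition : List (List (String × Int))) (args : List Int), Dom_ntile_py partition args → Pre_ntile_py partition args → Spec_ntile_py partition args (ntile_py partition args)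

-- ===== LEMMAS AND PROOFS =====

-- first row index of bucket b (1-based), for quotient q and remainder r
def bstart (q r b : Int) : Int := (b - 1) * q + min (b - 1) r
-- number of rows in bucket b
def blimit (q r b : Int) : Int := q + (if b ≤ r then 1 else 0)

lemma bstart_succ (q r b : Int) : bstart q r b + blimit q r b = bstart q r (b + 1) := by
  have h : (b + 1 - 1) * q = (b - 1) * q + q := by ring
  simp only [bstart, blimit]
  split_ifs <;> omega

lemma bstart_one (q r : Int) (hr0 : 0 ≤ r) : bstart q r 1 = 0 := by
  have h : (1 - 1 : Int) * q = 0 := by ring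
  simp only [bstart]; omega

lemma bstart_top (n q r : Int) (hrn : r < n) : bstart q r (n + 1) = n * q + r := by
  have h : (n + 1 - 1) * q = n * q := by ring
  simp only [bstart]; omega

-- the closed form returns b exactly on the rows of bucket b
lemma ntileBucket_char (n q r b i : Int) (hq0 : 0 ≤ q) (hr0 : 0 ≤ r) (hrn : r < n)
    (hb1 : 1 ≤ b) (hbn : b ≤ n)
    (hlo : bstart q r b ≤ i) (hhi : i < bstart q r b + blimit q r b) :
    ntileBucket q r (r * (q + 1)) i = b := by
  simp only [bstart, blimit] at hlo hhi
  by_cases hbr : b ≤ r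
  · rw [if_pos hbr] at hhi
    have hmin : min (b - 1) r = b - 1 := by omega
    rw [hmin] at hlo hhi
    have he1 : b * (q + 1) = (b - 1) * q + (b - 1) + (q + 1) := by ring
    have he2 : (b - 1) * (q + 1) = (b - 1) * q + (b - 1) := by ring
    have hub : i < b * (q + 1) := by omega
    have hthr : i < r * (q + 1) := by
      have := mul_le_mul_of_nonneg_right hbr (by omega : (0:Int) ≤ q + 1)
      omega
    have he0 : (b - 1 + 1) * (q + 1) = b * (q + 1) := by ring
    have hdiv : PySem.Int.floordiv i (q + 1) = b - 1 := by
      rw [PySem.Int.floordiv_eq_iff_of_pos (by omega)]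
      constructor <;> omega
    simp only [ntileBucket, if_pos hthr, hdiv]
    omega
  · rw [if_neg hbr] at hhi
    have hmin : min (b - 1) r = r := by omega
    rw [hmin] at hlo hhi
    have hq1 : 0 < q := by omega
    have he1 : r * (q + 1) = r * q + r := by ring
    have he2 : r * q ≤ (b - 1) * q := mul_le_mul_of_nonneg_right (by omega) hq0
    have hthr : ¬ i < r * (q + 1) := by omega
    have he3 : (b - 1 - r) * q = (b - 1) * q - r * q := by ring
    have he4 : (b - 1 - r + 1) * q = b * q - r * q := by ring
    have he5 : b * q = (b - 1) * q + q := by ring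
    have he6 : (b - 1 - r + 1) * q = (b - 1 - r) * q + q := by ring
    have hdiv : PySem.Int.floordiv (i - r * (q + 1)) q = b - 1 - r := by
      rw [PySem.Int.floordiv_eq_iff_of_pos hq1]
      constructor <;> omega
    simp only [ntileBucket, if_neg hthr, hdiv]
    omega

-- A's loop, started at row i in bucket b with the matching state, appends the closed-form buckets
lemma ntile_loop (n q r : Int) (hq0 : 0 ≤ q) (hr0 : 0 ≤ r) (hrn : r < n) :
    ∀ (xs : List (List (String × Int))) (b i : Int) (res : List Int),
      1 ≤ b → b ≤ n →
      bstart q r b ≤ i →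
      (xs = [] ∨ i < bstart q r b + blimit q r b) →
      i + (xs.length : Int) = n * q + r →
      (xs.foldl (ntileStep n q r) (res, b, i - bstart q r b, blimit q r b)).1
        = res ++ (PySem.List.pyRange i (i + xs.length) 1).map (ntileBucket q r (r * (q + 1))) := by
  intro xs
  induction xs with
  | nil =>
      intro b i res _ _ _ _ _
      simp
  | cons x xs' ih =>
      intro b i res hb1 hbn hlo hhi hlen
      have hhi' : i < bstart q r b + blimit q r b := by
        rcases hhi with h | h
        · exact (List.cons_ne_nil _ _ h).elim
        · exact h
      have hS : bstart q r (n + 1) = n * q + r := bstart_top n q r hrn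
      have hsucc := bstart_succ q r b
      simp only [List.length_cons] at hlen
      have hlen2 : i + 1 + (xs'.length : Int) = n * q + r := by push_cast at hlen ⊢; omega
      have hfi : ntileBucket q r (r * (q + 1)) i = b :=
        ntileBucket_char n q r b i hq0 hr0 hrn hb1 hbn hlo hhi'
      have hnn : (0 : Int) ≤ (xs'.length : Int) := Int.natCast_nonneg _
      have hbound : i + (((x :: xs').length : Nat) : Int) = (i + 1) + (xs'.length : Int) := by
        simp only [List.length_cons]; push_cast; omega
      rw [List.foldl_cons]
      rw [hbound, PySem.List.pyRange_one_cons (by omega), List.map_cons, hfi]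
      simp only [ntileStep]
      by_cases hC : blimit q r b ≤ i - bstart q r b + 1 ∧ b < n
      · rw [if_pos hC]
        have hEq : i + 1 = bstart q r (b + 1) := by omega
        have hstate : ((res ++ [b], b + 1, (0:Int), q + if b + 1 ≤ r then (1:Int) else 0)
              : List Int × Int × Int × Int)
            = (res ++ [b], b + 1, (i + 1) - bstart q r (b + 1), blimit q r (b + 1)) := by
          simp only [Prod.mk.injEq, blimit, true_and, and_true]
          omega
        rw [hstate]
        have hhi2 : xs' = [] ∨ i + 1 < bstart q r (b + 1) + blimit q r (b + 1) := by
          rcases xs' with _ | ⟨y, ys⟩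
          · exact Or.inl rfl
          · right
            have hlt : i + 1 < n * q + r := by
              simp only [List.length_cons] at hlen2
              push_cast at hlen2
              omega
            clear hlen hlen2
            have hsucc2 := bstart_succ q r (b + 1)
            rcases eq_or_lt_of_le hq0 with hq | hq
            · subst hq
              simp only [bstart, blimit, mul_zero, zero_add] at hEq hS hlt ⊢
              split_ifs at * <;> omega
            · simp only [blimit]
              split_ifs <;> omega
        rw [ih (b + 1) (i + 1) (res ++ [b]) (by omega) (by omega) (by omega) hhi2 hlen2]
        simp
      · rw [if_neg hC]
        have hst : i - bstart q r b + 1 = (i + 1) - bstart q r b := by omega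
        rw [hst]
        have hhi2 : xs' = [] ∨ i + 1 < bstart q r b + blimit q r b := by
          rcases xs' with _ | ⟨y, ys⟩
          · exact Or.inl rfl
          · right
            have hlt : i + 1 < n * q + r := by
              simp only [List.length_cons] at hlen2
              push_cast at hlen2
              omega
            by_cases hle : blimit q r b ≤ i - bstart q r b + 1
            · have hnb : ¬ b < n := fun h => hC ⟨hle, h⟩
              have hbn' : b = n := le_antisymm hbn (not_lt.mp hnb)
              subst hbn'
              omega
            · omega
        rw [ih b (i + 1) (res ++ [b]) hb1 hbn (by omega) hhi2 hlen2]
        simp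

lemma ntile_core (n : Int) (hn : 1 ≤ n) (rows : List (List (String × Int))) :
    (rows.foldl (ntileStep n (PySem.Int.floordiv (rows.length : Int) n) (PySem.Int.mod (rows.length : Int) n))
      ([], 1, 0, PySem.Int.floordiv (rows.length : Int) n +
        (if (1 : Int) ≤ PySem.Int.mod (rows.length : Int) n then 1 else 0))).1
      = (PySem.List.pyRange 0 (rows.length : Int) 1).map
          (ntileBucket (PySem.Int.floordiv (rows.length : Int) n) (PySem.Int.mod (rows.length : Int) n)
            (PySem.Int.mod (rows.length : Int) n * (PySem.Int.floordiv (rows.length : Int) n + 1))) := by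
  set q := PySem.Int.floordiv (rows.length : Int) n with hq
  set r := PySem.Int.mod (rows.length : Int) n with hr
  have hqr : q * n + r = (rows.length : Int) := PySem.Int.floordiv_mul_add_mod _ _
  have hr0 : 0 ≤ r := PySem.Int.mod_nonneg _ (by omega)
  have hrn : r < n := PySem.Int.mod_lt _ (by omega)
  have hq0 : 0 ≤ q := by
    by_contra h
    have h1 : q ≤ -1 := by omega
    have h2 : q * n ≤ -1 * n := mul_le_mul_of_nonneg_right h1 (by omega)
    have h3 : (0 : Int) ≤ (rows.length : Int) := Int.natCast_nonneg _
    omega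
  have hcomm : n * q = q * n := by ring
  have hstart1 : bstart q r 1 = 0 := bstart_one q r hr0
  have hstate : (([], 1, (0:Int), q + if (1:Int) ≤ r then (1:Int) else 0)
        : List Int × Int × Int × Int)
      = ([], 1, (0:Int) - bstart q r 1, blimit q r 1) := by
    simp only [Prod.mk.injEq, blimit, true_and, and_true]
    omega
  rw [hstate]
  have hhi : rows = [] ∨ (0:Int) < bstart q r 1 + blimit q r 1 := by
    rcases rows with _ | ⟨y, ys⟩
    · exact Or.inl rfl
    · right
      have hlen1 : (1 : Int) ≤ ((y :: ys).length : Int) := by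
        simp only [List.length_cons]; push_cast; omega
      simp only [blimit]
      rcases eq_or_lt_of_le hq0 with hq' | hq'
      -- q = 0 forces r = length ≥ 1
      · have hz : q * n = 0 := by rw [← hq']; ring
        split_ifs with h <;> omega
      · split_ifs <;> omega
  rw [ntile_loop n q r hq0 hr0 hrn rows 1 0 [] (by omega) hn (by omega) hhi (by omega)]
  simp

-- ===== VERDICT (by name: the statement is the Claim_ definition above) =====
theorem ntile_py_spec : Claim_equal_ntile_py := by
  intro partition args _ hpre
  unfold Spec_ntile_py
  rcases args with _ | ⟨a, rest⟩
  · simp only [ntile_py, ntile_py_alt, PySem.List.len_eq]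
    exact ntile_core 4 (by omega) partition
  · have ha : 1 ≤ a := by
      rcases hpre with h | h
      · simp at h
      · simpa using h
    simp only [ntile_py, ntile_py_alt, PySem.List.len_eq]
    exact ntile_core a ha partition
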